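-- pv_equiv track=rewrite | github.com/Mahd-Mehn/MM-legato | services/ai-service/adaptation_service.py | _convert_to_visual_description
-- ===== SOURCE A (Python) =====
-- def _convert_to_visual_description(text: str) -> str:
--     """Convert narrative text to visual description for comics"""
--     # Enhance narrative for visual medium
--     visual_keywords = {
--         'walked': 'walking across the panel',
--         'looked': 'gazing with intense expression',
--         'thought': 'shown in thought bubble',
--         'felt': 'expression showing emotion',
--         'heard': 'sound effects visible'
--     }
--
--     enhanced_text = text
--     for word, replacement in visual_keywords.items():
--         enhanced_text = enhanced_text.replace(word, replacement)
--
--     return enhanced_text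
-- ===== SOURCE B (Python) =====
-- def _convert_to_visual_description(text: str) -> str:
--     """Convert narrative text to visual description for comics"""
--     replacements = [
--         ('walked', 'walking across the panel'),
--         ('looked', 'gazing with intense expression'),
--         ('thought', 'shown in thought bubble'),
--         ('felt', 'expression showing emotion'),
--         ('heard', 'sound effects visible'),
--     ]
--
--     def apply(s, items):
--         if not items:
--             return s
--         word, repl = items[0]
--         return apply(repl.join(s.split(word)), items[1:])
--
--     return apply(text, replacements)
-- ===== Notes on version B (the rewrite author's own statement) =====
-- stated objective: alternative
-- what changed: The imperative loop of five str.replace passes becomes a recursion over the keyword list in which each substitution is done by segmentation, repl.join(s.split(word)), instead of str.replace.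
import Mathlib
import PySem

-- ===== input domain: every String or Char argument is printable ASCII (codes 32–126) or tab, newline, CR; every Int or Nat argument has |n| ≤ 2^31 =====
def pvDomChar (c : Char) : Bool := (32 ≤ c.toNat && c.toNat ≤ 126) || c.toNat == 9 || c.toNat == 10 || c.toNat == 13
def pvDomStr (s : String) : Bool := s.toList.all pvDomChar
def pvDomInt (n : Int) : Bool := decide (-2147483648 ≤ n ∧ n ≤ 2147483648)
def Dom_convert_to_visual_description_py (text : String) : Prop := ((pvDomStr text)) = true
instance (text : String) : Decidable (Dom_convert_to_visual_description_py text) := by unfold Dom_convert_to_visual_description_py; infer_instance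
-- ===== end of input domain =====

-- B replaces the five sequential str.replace passes with a recursion over the keyword
-- list that performs each substitution by split/join segmentation (objective: alternative).


-- ===== PORT A =====
def convert_to_visual_description_py (text : String) : String :=
  -- the dict literal `visual_keywords` has distinct literal keys; `.items()` iterates in insertion order
  let visual_keywords : List (String × String) :=
    [("walked", "walking across the panel"),
     ("looked", "gazing with intense expression"),
     ("thought", "shown in thought bubble"),
     ("felt", "expression showing emotion"),
     ("heard", "sound effects visible")]
  visual_keywords.foldl (fun enhanced_text p => PySem.Str.replace enhanced_text p.1 p.2) text

-- ===== PORT B =====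
-- `s.split(word)` for the nonempty literal `word` is exactly Chars.splitOn on the code points
def pvApplyAll : String → List (String × String) → String
  | s, [] => s
  | s, (word, repl) :: rest =>
      pvApplyAll (PySem.Str.join repl ((PySem.Chars.splitOn s.toList word.toList).map String.ofList)) rest

def convert_to_visual_description_py_alt (text : String) : String :=
  pvApplyAll text
    [("walked", "walking across the panel"),
     ("looked", "gazing with intense expression"),
     ("thought", "shown in thought bubble"),
     ("felt", "expression showing emotion"),
     ("heard", "sound effects visible")]

-- ===== PRECONDITION & SPEC =====
def Spec_convert_to_visual_description_py (text : String) (out : String) : Prop := out = convert_to_visual_description_py_alt text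
instance (text : String) (out : String) : Decidable (Spec_convert_to_visual_description_py text out) := by unfold Spec_convert_to_visual_description_py; infer_instance

-- ===== CLAIM (what is proved, stated in full; the proofs are below) =====
def Claim_equal_convert_to_visual_description_py : Prop := ∀ (text : String), Dom_convert_to_visual_description_py text → Spec_convert_to_visual_description_py text (convert_to_visual_description_py text)

-- ===== LEMMAS AND PROOFS =====

-- appending characters to the LAST segment appends them to the joined string
theorem pv_join_snoc_append (sep : List Char) : ∀ (xs : List (List Char)) (ys zs : List Char),
    PySem.Chars.join sep (xs ++ [ys ++ zs]) = PySem.Chars.join sep (xs ++ [ys]) ++ zs := by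
  intro xs
  induction xs with
  | nil => intro ys zs; simp [PySem.Chars.join_singleton]
  | cons x t ih =>
    intro ys zs
    cases t with
    | nil =>
      simp [PySem.Chars.join_cons_cons, PySem.Chars.join_singleton, List.append_assoc]
    | cons y u =>
      simp only [List.cons_append, PySem.Chars.join_cons_cons]
      rw [show (y :: (u ++ [ys ++ zs])) = ((y :: u) ++ [ys ++ zs]) from rfl,
          show (y :: (u ++ [ys])) = ((y :: u) ++ [ys]) from rfl, ih]
      simp [List.append_assoc]

-- closing the last segment and opening an empty one appends one separator
theorem pv_join_snoc_sep (sep : List Char) : ∀ (xs : List (List Char)) (w : List Char),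
    PySem.Chars.join sep ((xs ++ [w]) ++ [([] : List Char)]) = PySem.Chars.join sep (xs ++ [w]) ++ sep := by
  intro xs
  induction xs with
  | nil => intro w; simp [PySem.Chars.join_cons_cons, PySem.Chars.join_singleton]
  | cons x t ih =>
    intro w
    cases t with
    | nil =>
      simp [PySem.Chars.join_cons_cons, PySem.Chars.join_singleton, List.append_assoc]
    | cons y u =>
      simp only [List.cons_append, PySem.Chars.join_cons_cons]
      rw [show (y :: (u ++ [w] ++ [([] : List Char)])) = (((y :: u) ++ [w]) ++ [([] : List Char)]) from rfl,
          show (y :: (u ++ [w])) = ((y :: u) ++ [w]) from rfl, ih]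
      simp [List.append_assoc]

-- the two worker loops march in lockstep
theorem pv_go_eq (old new : List Char) (hold : old ≠ []) (fuel1 fuel2 : Nat) (l cur : List Char)
    (acc : List (List Char)) (h1 : l.length ≤ fuel1) (h2 : l.length ≤ fuel2) :
    PySem.Chars.replace.go old new fuel1 l (PySem.Chars.join new (acc.reverse ++ [cur.reverse])).reverse
      = PySem.Chars.join new (PySem.Chars.splitOn.go old fuel2 l cur acc) := by
  induction fuel1 generalizing fuel2 l cur acc with
  | zero =>
    have hl : l = [] := List.eq_nil_of_length_eq_zero (Nat.le_zero.mp h1)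
    subst hl
    cases fuel2 <;> simp [PySem.Chars.replace.go, PySem.Chars.splitOn.go]
  | succ n ih =>
    cases l with
    | nil => cases fuel2 <;> simp [PySem.Chars.replace.go, PySem.Chars.splitOn.go]
    | cons c t =>
      cases fuel2 with
      | zero => simp at h2
      | succ m =>
        have holdlen : 1 ≤ old.length := List.length_pos_iff.mpr hold
        simp only [PySem.Chars.replace.go, PySem.Chars.splitOn.go]
        have h1' : t.length + 1 ≤ n + 1 := by simpa using h1
        have h2' : t.length + 1 ≤ m + 1 := by simpa using h2
        by_cases hp : old.isPrefixOf (c :: t) = true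
        · simp only [hp, if_true]
          have harr : (new.reverse ++ (PySem.Chars.join new (acc.reverse ++ [cur.reverse])).reverse)
              = (PySem.Chars.join new ((cur.reverse :: acc).reverse ++ [([] : List Char).reverse])).reverse := by
            simp only [List.reverse_cons, List.reverse_nil]
            rw [pv_join_snoc_sep]
            simp
          rw [harr]
          refine ih _ _ _ _ ?_ ?_ <;> simp only [List.length_drop, List.length_cons] <;> omega
        · simp only [hp]
          have harr : (c :: (PySem.Chars.join new (acc.reverse ++ [cur.reverse])).reverse)
              = (PySem.Chars.join new (acc.reverse ++ [(c :: cur).reverse])).reverse := by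
            simp only [List.reverse_cons]
            rw [pv_join_snoc_append]
            simp
          rw [harr]
          exact ih _ _ _ _ (by omega) (by omega)

theorem pv_replace_eq_join_splitOn (s old new : List Char) (hold : old ≠ []) :
    PySem.Chars.replace s old new = PySem.Chars.join new (PySem.Chars.splitOn s old) := by
  unfold PySem.Chars.replace PySem.Chars.splitOn
  rw [if_neg (by simp [hold])]
  have h := pv_go_eq old new hold s.length (s.length + 1) s [] [] (le_refl _) (Nat.le_succ _)
  simpa [PySem.Chars.join_singleton] using h

theorem pv_str_key (s w r : String) (hw : w.toList ≠ []) :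
    PySem.Str.replace s w r
      = PySem.Str.join r ((PySem.Chars.splitOn s.toList w.toList).map String.ofList) := by
  unfold PySem.Str.replace PySem.Str.join
  rw [pv_replace_eq_join_splitOn _ _ _ hw]
  congr 1
  simp [List.map_map, Function.comp_def, String.toList_ofList]

-- ===== VERDICT (by name: the statement is the Claim_ definition above) =====
theorem convert_to_visual_description_py_spec : Claim_equal_convert_to_visual_description_py := by
  intro text _
  unfold Spec_convert_to_visual_description_py convert_to_visual_description_py convert_to_visual_description_py_alt
  simp only [List.foldl_cons, List.foldl_nil, pvApplyAll]
  rw [pv_str_key _ "walked" _ (by decide), pv_str_key _ "looked" _ (by decide),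
      pv_str_key _ "thought" _ (by decide), pv_str_key _ "felt" _ (by decide),
      pv_str_key _ "heard" _ (by decide)]
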